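-- pv_equiv track=rewrite | github.com/franciscouzo/corporate_bullshit | corporate_bullshit.py | make_eventual_plural
-- ===== SOURCE A (Python) =====
-- def make_eventual_plural(word, plural):
--     if len(word) < 3 or not plural:
--         return word
--
--     try:
--         abbr = word.index(" (")
--         return make_eventual_plural(word[:abbr], plural) + word[abbr:]
--     except ValueError:
--         pass
--
--     if word == "matrix":
--         return "matrices"
--     elif word == "analysis":
--         return "analyses"
--     elif word[-2:] == "gh":
--         return word + "s"
--     elif word[-1] in "sxzh":
--         return word + "es"
--     elif word[-1] == "y" and word[-2].lower() not in "aeiou":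
--         return word[:-1] + "ies"
--
--     return word + "s"
-- ===== SOURCE B (Python) =====
-- # Table-driven: the whole rule chain becomes a data table of (matcher, chars-to-drop, suffix)
-- # scanned for the first match; the try/except recursion becomes split(" (", 1) + " (".join.
-- RULES = [
--     (lambda h: h == "matrix", 6, "matrices"),
--     (lambda h: h == "analysis", 8, "analyses"),
--     (lambda h: h.endswith("gh"), 0, "s"),
--     (lambda h: h[-1] in "sxzh", 0, "es"),
--     (lambda h: h[-1] == "y" and h[-2].lower() not in "aeiou", 1, "ies"),
--     (lambda h: True, 0, "s"),
-- ]
--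
--
-- def make_eventual_plural(word, plural):
--     if len(word) < 3 or not plural:
--         return word
--     pieces = word.split(" (", 1)
--     head = pieces[0]
--     if len(head) >= 3:
--         drop, add = next((d, a) for cond, d, a in RULES if cond(head))
--         pieces[0] = head[:len(head) - drop] + add
--     return " (".join(pieces)
-- ===== Notes on version B (the rewrite author's own statement) =====
-- stated objective: alternative
-- what changed: The if/elif suffix chain becomes a data-driven rule table of (matcher, chars-to-drop, suffix) triples scanned for the first match with next(), and the try/except one-level recursion becomes word.split(' (', 1) with an in-place pieces[0] update and ' ('.join reassembly.
import Mathlib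
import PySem

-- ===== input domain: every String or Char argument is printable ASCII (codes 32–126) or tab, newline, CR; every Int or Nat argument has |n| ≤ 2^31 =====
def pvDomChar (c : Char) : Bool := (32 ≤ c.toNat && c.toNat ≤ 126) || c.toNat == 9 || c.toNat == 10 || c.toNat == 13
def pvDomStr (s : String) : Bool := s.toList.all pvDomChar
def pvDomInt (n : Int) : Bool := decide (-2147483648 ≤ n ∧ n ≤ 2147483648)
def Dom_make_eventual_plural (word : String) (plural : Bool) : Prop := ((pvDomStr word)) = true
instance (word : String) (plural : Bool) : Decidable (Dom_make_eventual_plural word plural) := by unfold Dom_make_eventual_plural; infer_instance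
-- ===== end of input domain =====

-- B is table-driven: the if/elif chain becomes a data table of (matcher, drop, suffix) rules scanned
-- for the first match, and the try/except recursion becomes split(" (", 1) + " (".join; same cost.

-- ===== PORT A =====
-- termination helper for the recursive call on word[:abbr] (cited by decreasing_by)
theorem pvA_slice_lt (w : List Char) (h3 : 3 ≤ w.length)
    (hne : PySem.Chars.find w [' ', '('] ≠ -1) :
    (PySem.Chars.slice w none (some (PySem.Chars.find w [' ', '(']))).length < w.length := by
  have h0 : 0 ≤ PySem.Chars.find w [' ', '('] := by
    have := PySem.Chars.neg_one_le_find w [' ', '(']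
    omega
  rw [PySem.Chars.slice_eq_listSlice, PySem.List.slice_to w h0]
  have hs := (PySem.Chars.find_spec (s := w) (sub := [' ', '(']) h0).1
  have hlen := hs.length_le
  simp only [List.length_drop, List.length_cons, List.length_nil] at hlen
  simp only [List.length_take]
  omega

-- literal port of A; one level of structural recursion on the prefix before the first " ("
def pluralA_core (w : List Char) (plural : Bool) : List Char :=
  if w.length < 3 ∨ plural = false then w
  else
    -- word.index(" ("): find = -1 renders the ValueError branch of the try/except
    let i := PySem.Chars.find w [' ', '(']
    if hne : i ≠ -1 then
      pluralA_core (PySem.Chars.slice w none (some i)) plural ++ PySem.Chars.slice w (some i) none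
    else if w = ['m','a','t','r','i','x'] then ['m','a','t','r','i','c','e','s']
    else if w = ['a','n','a','l','y','s','i','s'] then ['a','n','a','l','y','s','e','s']
    else if PySem.Chars.slice w (some (-2)) none = ['g','h'] then w ++ ['s']
    -- word[-1] / word[-2] are in range here (len ≥ 3), so the total pyGetD form is exact
    else if PySem.Chars.isIn [PySem.List.pyGetD w (-1) ' '] ['s','x','z','h'] then w ++ ['e','s']
    else if PySem.List.pyGetD w (-1) ' ' = 'y' ∧
        ¬ PySem.Chars.isIn [PySem.Chars.lowerChar (PySem.List.pyGetD w (-2) ' ')] ['a','e','i','o','u'] then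
      PySem.Chars.slice w none (some (-1)) ++ ['i','e','s']
    else w ++ ['s']
termination_by w.length
decreasing_by
  rename_i h
  exact pvA_slice_lt w (by omega) hne

def make_eventual_plural (word : String) (plural : Bool) : String :=
  String.ofList (pluralA_core word.toList plural)

-- ===== PORT B =====
-- the RULES table: (matcher, number of chars to drop, suffix to add); matchers are only ever
-- applied to a head of length ≥ 3, so the total pyGetD form of h[-1] / h[-2] is exact
def pvRules : List ((List Char → Bool) × Nat × List Char) :=
  [ (fun h => h == ['m','a','t','r','i','x'], 6, ['m','a','t','r','i','c','e','s']),
    (fun h => h == ['a','n','a','l','y','s','i','s'], 8, ['a','n','a','l','y','s','e','s']),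
    (fun h => PySem.Chars.endswith h ['g','h'], 0, ['s']),
    (fun h => PySem.Chars.isIn [PySem.List.pyGetD h (-1) ' '] ['s','x','z','h'], 0, ['e','s']),
    (fun h => (PySem.List.pyGetD h (-1) ' ' == 'y') &&
        !(PySem.Chars.isIn [PySem.Chars.lowerChar (PySem.List.pyGetD h (-2) ' ')] ['a','e','i','o','u']),
      1, ['i','e','s']),
    (fun _ => true, 0, ['s']) ]

-- next((d, a) for cond, d, a in RULES if cond(head)): first matching rule; the [] case is dead
-- because pvRules ends with a catch-all (Python's next would raise StopIteration there)
def pvFirstRule : List ((List Char → Bool) × Nat × List Char) → List Char → Nat × List Char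
  | [], _ => (0, ['s'])
  | (c, d, a) :: rs, h => if c h then (d, a) else pvFirstRule rs h

def pluralB_core (w : List Char) (p : Bool) : List Char :=
  if w.length < 3 ∨ p = false then w
  else
    let pieces := PySem.Chars.splitOnMax w [' ', '('] 1   -- word.split(" (", 1)
    let head := PySem.List.pyGetD pieces 0 []             -- pieces[0]; split never returns []
    let pieces' :=
      if 3 ≤ head.length then
        -- pieces[0] = head[:len(head) - drop] + add
        let r := pvFirstRule pvRules head
        (PySem.Chars.slice head none (some ((head.length : Int) - (r.1 : Int))) ++ r.2) :: pieces.tail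
      else pieces
    PySem.Chars.join [' ', '('] pieces'                   -- " (".join(pieces)

def make_eventual_plural_alt (word : String) (plural : Bool) : String :=
  String.ofList (pluralB_core word.toList plural)

-- ===== PRECONDITION & SPEC =====
def Spec_make_eventual_plural (word : String) (plural : Bool) (out : String) : Prop := out = make_eventual_plural_alt word plural
instance (word : String) (plural : Bool) (out : String) : Decidable (Spec_make_eventual_plural word plural out) := by unfold Spec_make_eventual_plural; infer_instance

-- ===== CLAIM (what is proved, stated in full; the proofs are below) =====
def Claim_equal_make_eventual_plural : Prop := ∀ (word : String) (plural : Bool), Dom_make_eventual_plural word plural → Spec_make_eventual_plural word plural (make_eventual_plural word plural)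

-- ===== LEMMAS AND PROOFS =====

-- find.go at offset k, expressed through find itself
theorem pv_go_shift (l : List Char) (k : Nat) :
    PySem.Chars.find.go [' ', '('] l k =
      if PySem.Chars.find l [' ', '('] = -1 then -1 else PySem.Chars.find l [' ', '('] + k := by
  induction l generalizing k with
  | nil => simp [PySem.Chars.find, PySem.Chars.find.go]
  | cons c t ih =>
    rw [PySem.Chars.find.go]
    cases hp : [' ', '('].isPrefixOf (c :: t) with
    | true =>
      have hfind : PySem.Chars.find (c :: t) [' ', '('] = 0 := by
        rw [PySem.Chars.find, PySem.Chars.find.go, hp]; rfl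
      simp [hfind]
    | false =>
      have hfind : PySem.Chars.find (c :: t) [' ', '('] = PySem.Chars.find.go [' ', '('] t 1 := by
        rw [PySem.Chars.find, PySem.Chars.find.go, hp]; norm_num
      simp only [Bool.false_eq_true, if_false]
      rw [ih (k + 1), hfind, ih 1]
      have := PySem.Chars.neg_one_le_find t [' ', '(']
      split_ifs with h1 h2 h3 <;> push_cast <;> omega

-- the first step of find on a cons
theorem pv_find_cons (c : Char) (t : List Char) :
    PySem.Chars.find (c :: t) [' ', '('] =
      if [' ', '('].isPrefixOf (c :: t) = true then 0
      else if PySem.Chars.find t [' ', '('] = -1 then -1 else PySem.Chars.find t [' ', '('] + 1 := by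
  rw [PySem.Chars.find, PySem.Chars.find.go]
  cases hp : [' ', '('].isPrefixOf (c :: t) with
  | true => simp
  | false =>
    simp only [Bool.false_eq_true, if_false]
    have : (0 : Nat) + 1 = 1 := rfl
    rw [this, pv_go_shift t 1]
    norm_num

-- split.go with maxsplit exhausted: everything left is the last piece
theorem pv_go0 (fuel : Nat) (l cur : List Char) (accs : List (List Char)) :
    PySem.Chars.splitOnMax.go [' ', '('] fuel 0 (l) (cur) (accs) =
      accs.reverse ++ [cur.reverse ++ l] := by
  cases fuel with
  | zero => simp [PySem.Chars.splitOnMax.go]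
  | succ f =>
    cases l with
    | nil => simp [PySem.Chars.splitOnMax.go]
    | cons c t => simp [PySem.Chars.splitOnMax.go]

-- split.go with one split left: the characterization through find
theorem pv_go1 (l : List Char) (fuel : Nat) (hf : l.length < fuel) (cur : List Char)
    (accs : List (List Char)) :
    PySem.Chars.splitOnMax.go [' ', '('] fuel 1 l cur accs =
      (if PySem.Chars.find l [' ', '('] = -1 then accs.reverse ++ [cur.reverse ++ l]
       else accs.reverse ++ [cur.reverse ++ List.take (PySem.Chars.find l [' ', '(']).toNat l,
            List.drop ((PySem.Chars.find l [' ', '(']).toNat + 2) l]) := by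
  induction l generalizing fuel cur accs with
  | nil =>
    cases fuel with
    | zero => omega
    | succ f => simp [PySem.Chars.splitOnMax.go, PySem.Chars.find, PySem.Chars.find.go]
  | cons c t ih =>
    cases fuel with
    | zero => omega
    | succ f =>
      rw [PySem.Chars.splitOnMax.go]
      have hfind := pv_find_cons c t
      cases hp : [' ', '('].isPrefixOf (c :: t) with
      | true =>
        rw [hp] at hfind
        simp only [if_true] at hfind
        obtain ⟨r, hr⟩ := List.isPrefixOf_iff_prefix.mp hp
        rw [if_neg (by omega : ¬ (1 = 0))]
        simp only [if_true]
        rw [pv_go0, hfind]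
        have hdrop : List.drop 2 (c :: t) = r := by rw [← hr]; simp
        simp [hdrop]
      | false =>
        rw [hp] at hfind
        simp only [Bool.false_eq_true, if_false] at hfind
        simp only [Bool.false_eq_true, if_false, if_neg (by omega : ¬ (1 = 0))]
        rw [ih f (by simpa using hf) (c :: cur) accs]
        by_cases ht : PySem.Chars.find t [' ', '('] = -1
        · rw [hfind, if_pos ht, if_pos ht]
          simp
        · have h0 : 0 ≤ PySem.Chars.find t [' ', '('] := by
            have := PySem.Chars.neg_one_le_find t [' ', '(']; omega
          rw [hfind, if_neg ht, if_neg (by omega)]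
          have htn : (PySem.Chars.find t [' ', '('] + 1).toNat =
              (PySem.Chars.find t [' ', '(']).toNat + 1 := by omega
          rw [if_neg ht, htn]
          simp

-- word.split(" (", 1), characterized through find
theorem pv_split (w : List Char) :
    PySem.Chars.splitOnMax w [' ', '('] 1 =
      (if PySem.Chars.find w [' ', '('] = -1 then [w]
       else [List.take (PySem.Chars.find w [' ', '(']).toNat w,
             List.drop ((PySem.Chars.find w [' ', '(']).toNat + 2) w]) := by
  rw [PySem.Chars.splitOnMax, if_neg (by omega : ¬ ((1:Int) < 0))]
  have : (1 : Int).toNat = 1 := rfl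
  rw [this, pv_go1 w (w.length + 1) (by omega) [] []]
  split_ifs <;> simp

-- A's rule chain (the no-" (" case) equals B's table scan applied to the head
theorem pv_base (w : List Char) (h3 : 3 ≤ w.length) (hfind : PySem.Chars.find w [' ', '('] = -1) :
    pluralA_core w true =
      PySem.Chars.slice w none (some ((w.length : Int) - ((pvFirstRule pvRules w).1 : Int))) ++
        (pvFirstRule pvRules w).2 := by
  by_cases hm : w = ['m','a','t','r','i','x']
  · subst hm; rw [pluralA_core]; decide
  · by_cases ha : w = ['a','n','a','l','y','s','i','s']
    · subst ha; rw [pluralA_core]; decide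
    · have hl : ¬ (w.length < 3) := by omega
      rw [pluralA_core]
      simp only [hl, Bool.true_eq_false, or_self, if_false, hfind, ne_eq, not_true_eq_false,
        dite_false, hm, ha, if_false]
      -- unfold the rule scan on the concrete table
      simp only [pvRules, pvFirstRule]
      rw [if_neg (show ¬ ((w == ['m','a','t','r','i','x']) = true) from by simpa using hm),
        if_neg (show ¬ ((w == ['a','n','a','l','y','s','i','s']) = true) from by simpa using ha)]
      have hb1 : w.length - 1 < w.length := by omega
      have hb2 : w.length - 2 < w.length := by omega
      have hlast : PySem.List.pyGetD w (-1) ' ' = w[w.length-1] := by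
        have h := PySem.List.pyGet?_neg_ofNat w 1 (by omega) (by omega)
        simp only [PySem.List.pyGetD]
        norm_num at h
        rw [h, List.getElem?_eq_getElem hb1, Option.getD_some]
      have hprev : PySem.List.pyGetD w (-2) ' ' = w[w.length-2] := by
        have h := PySem.List.pyGet?_neg_ofNat w 2 (by omega) (by omega)
        simp only [PySem.List.pyGetD]
        norm_num at h
        rw [h, List.getElem?_eq_getElem hb2, Option.getD_some]
      -- the full-word slices B takes when drop = 0 / drop = 1
      have hW0 : PySem.Chars.slice w none (some ((w.length : Int) - (0:Nat))) = w := by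
        rw [PySem.Chars.slice_eq_listSlice,
          PySem.List.slice_to w (by omega : (0:Int) ≤ (w.length : Int) - ((0:Nat) : Int)),
          show ((w.length : Int) - ((0:Nat) : Int)).toNat = w.length from by omega,
          List.take_length]
      have hW1 : PySem.Chars.slice w none (some ((w.length : Int) - (1:Nat))) = w.dropLast := by
        rw [PySem.Chars.slice_eq_listSlice,
          PySem.List.slice_to w (by omega : (0:Int) ≤ (w.length : Int) - ((1:Nat) : Int)),
          show ((w.length : Int) - ((1:Nat) : Int)).toNat = w.length - 1 from by omega,
          List.dropLast_eq_take]
      -- the "gh" rule: A's w[-2:] == "gh" is B's endswith(w, "gh")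
      have hgh : PySem.Chars.slice w (some (-2)) none = ['g','h'] ↔
          PySem.Chars.endswith w ['g','h'] = true := by
        rw [PySem.Chars.slice_eq_listSlice, PySem.List.slice_from_neg_ofNat w 2 (by omega),
          PySem.Chars.endswith_iff]
        constructor
        · intro h; rw [← h]; exact List.drop_suffix _ _
        · intro h
          obtain ⟨s, hs⟩ := h
          rw [← hs]
          have hlen : (s ++ ['g','h']).length - 2 = s.length := by simp
          rw [hlen, List.drop_left]
      by_cases hg : PySem.Chars.slice w (some (-2)) none = ['g','h']
      · rw [if_pos hg, if_pos (hgh.mp hg), hW0]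
      · rw [if_neg hg, if_neg (show ¬ (PySem.Chars.endswith w ['g','h'] = true) from
          fun h => hg (hgh.mpr h))]
        by_cases hs : PySem.Chars.isIn [PySem.List.pyGetD w (-1) ' '] ['s','x','z','h'] = true
        · rw [if_pos hs, if_pos hs, hW0]
        · rw [if_neg hs, if_neg hs]
          by_cases hy : PySem.List.pyGetD w (-1) ' ' = 'y' ∧
              ¬ PySem.Chars.isIn [PySem.Chars.lowerChar (PySem.List.pyGetD w (-2) ' ')]
                ['a','e','i','o','u'] = true
          · rw [if_pos hy, if_pos (show ((PySem.List.pyGetD w (-1) ' ' == 'y') &&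
                !(PySem.Chars.isIn [PySem.Chars.lowerChar (PySem.List.pyGetD w (-2) ' ')]
                  ['a','e','i','o','u'])) = true from by
                simp only [Bool.and_eq_true, beq_iff_eq, Bool.not_eq_true']
                exact ⟨hy.1, by simpa using hy.2⟩), hW1]
            rw [PySem.Chars.slice_eq_listSlice, PySem.List.slice_to_neg_one]
          · rw [if_neg hy, if_neg (show ¬ (((PySem.List.pyGetD w (-1) ' ' == 'y') &&
                !(PySem.Chars.isIn [PySem.Chars.lowerChar (PySem.List.pyGetD w (-2) ' ')]
                  ['a','e','i','o','u'])) = true) from by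
                simp only [Bool.and_eq_true, beq_iff_eq, Bool.not_eq_true']
                intro h
                exact hy ⟨h.1, by simpa using h.2⟩), ite_self]
            show w ++ ['s'] =
              PySem.Chars.slice w none (some ((w.length : Int) - ((0:Nat) : Int))) ++ ['s']
            rw [hW0]

-- word[:abbr] (abbr = first occurrence of " (") contains no " ("
theorem pv_head_find (w : List Char) (hne : PySem.Chars.find w [' ', '('] ≠ -1) :
    PySem.Chars.find (List.take (PySem.Chars.find w [' ', '(']).toNat w) [' ', '('] = -1 := by
  have h0 : 0 ≤ PySem.Chars.find w [' ', '('] := by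
    have := PySem.Chars.neg_one_le_find w [' ', '(']; omega
  set t := (PySem.Chars.find w [' ', '(']).toNat with ht
  rw [PySem.Chars.find_eq_neg_one_iff]
  intro hinf
  obtain ⟨j, hj⟩ := (PySem.Chars.exists_prefix_drop_iff_isIn [' ', '('] (List.take t w)).mpr
    ((PySem.Chars.isIn_iff_infix _ _).mpr hinf)
  rw [List.drop_take] at hj
  have hpre : [' ', '('] <+: List.drop j w := hj.trans (List.take_prefix _ _)
  have hjlen := hj.length_le
  simp only [List.length_take, List.length_drop, List.length_cons, List.length_nil] at hjlen
  exact (PySem.Chars.find_spec h0).2 j (by omega) hpre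

-- word[abbr:] starts with " ("
theorem pv_tail (w : List Char) (hne : PySem.Chars.find w [' ', '('] ≠ -1) :
    List.drop (PySem.Chars.find w [' ', '(']).toNat w =
      ' ' :: '(' :: List.drop ((PySem.Chars.find w [' ', '(']).toNat + 2) w := by
  have h0 : 0 ≤ PySem.Chars.find w [' ', '('] := by
    have := PySem.Chars.neg_one_le_find w [' ', '(']; omega
  set t := (PySem.Chars.find w [' ', '(']).toNat with ht
  obtain ⟨r, hr⟩ := (PySem.Chars.find_spec h0).1
  have hdd : List.drop (t + 2) w = r := by
    rw [← List.drop_drop, ← hr]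
    simp
  rw [hdd, ← hr]
  simp

-- " (".join on the one- and two-piece lists split can return
theorem pv_join1 (x : List Char) : PySem.Chars.join [' ', '('] [x] = x := by
  simp [PySem.Chars.join, List.intercalate]

theorem pv_join2 (x y : List Char) :
    PySem.Chars.join [' ', '('] [x, y] = x ++ ' ' :: '(' :: y := by
  simp [PySem.Chars.join, List.intercalate]

theorem pv_core_eq (w : List Char) (p : Bool) : pluralA_core w p = pluralB_core w p := by
  rw [pluralB_core]
  by_cases hb : w.length < 3 ∨ p = false
  · rw [pluralA_core]
    rw [if_pos hb, if_pos hb]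
  · have hp : p = true := by rcases p with _ | _ <;> simp_all
    subst hp
    have h3 : 3 ≤ w.length := by
      rcases Nat.lt_or_ge w.length 3 with h | h
      · exact absurd (Or.inl h) hb
      · exact h
    rw [if_neg hb]
    simp only [pv_split w]
    by_cases hi : PySem.Chars.find w [' ', '('] = -1
    · simp only [hi, if_true]
      have hget : PySem.List.pyGetD [w] 0 [] = w := rfl
      simp only [hget, if_pos h3, List.tail_cons, pv_join1]
      exact pv_base w h3 hi
    · have h0 : 0 ≤ PySem.Chars.find w [' ', '('] := by
        have := PySem.Chars.neg_one_le_find w [' ', '(']; omega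
      have hle : (PySem.Chars.find w [' ', '(']).toNat ≤ w.length := by
        have := PySem.Chars.find_le_length w [' ', '(']; omega
      have hhead : (List.take (PySem.Chars.find w [' ', '(']).toNat w).length =
          (PySem.Chars.find w [' ', '(']).toNat := by
        simp
        omega
      have hgetp : PySem.List.pyGetD
          [List.take (PySem.Chars.find w [' ', '(']).toNat w,
           List.drop ((PySem.Chars.find w [' ', '(']).toNat + 2) w] 0 [] =
          List.take (PySem.Chars.find w [' ', '(']).toNat w := rfl
      -- A takes its recursive branch
      rw [pluralA_core]
      rw [if_neg hb, dif_pos hi]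
      rw [PySem.Chars.slice_eq_listSlice, PySem.Chars.slice_eq_listSlice,
        PySem.List.slice_to w h0, PySem.List.slice_from w h0, pv_tail w hi]
      simp only [hi, if_false, hgetp, hhead]
      by_cases hlen : 3 ≤ (PySem.Chars.find w [' ', '(']).toNat
      · rw [if_pos hlen, List.tail_cons, pv_join2]
        rw [pv_base (List.take (PySem.Chars.find w [' ', '(']).toNat w)
          (by rw [hhead]; exact hlen) (pv_head_find w hi)]
        rw [hhead]
      · rw [if_neg hlen, pv_join2]
        rw [pluralA_core]
        rw [if_pos (Or.inl (by rw [hhead]; omega))]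
-- ===== VERDICT (by name: the statement is the Claim_ definition above) =====
theorem make_eventual_plural_spec : Claim_equal_make_eventual_plural := by
  intro word plural _
  unfold Spec_make_eventual_plural make_eventual_plural make_eventual_plural_alt
  rw [pv_core_eq]
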